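-- pv_equiv track=rewrite | github.com/tessvansmoorenburg/Computer-Science | MSMP++.py | compute_gold_pairs
-- ===== SOURCE A (Python) =====
-- from typing import List, Dict, Set, Any, Tuple
-- from itertools import combinations
-- from collections import defaultdict, Counter
--
-- def compute_gold_pairs(products: List[Dict]) -> Set[Tuple[int, int]]:
--     """Generates the set of true duplicate pairs based on Model ID."""
--     model_map = defaultdict(list)
--     for idx, p in enumerate(products):
--         model_map[p.get("model", "")].append((idx, p.get("shop")))
--
--     gold = set()
--     for items in model_map.values():
--         if len(items) > 1:
--             # Pair products with same Model ID but different Shops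
--             for (i, s1), (j, s2) in combinations(items, 2):
--                 if s1 != s2:
--                     gold.add(tuple(sorted((i, j))))
--     return gold
-- ===== SOURCE B (Python) =====
-- def _cross_pairs(grp):
--     """All (i, j) with i before j in grp and different shops (recursion on the group)."""
--     if not grp:
--         return []
--     (i, s), rest = grp[0], grp[1:]
--     return [(i, j) for (j, t) in rest if s != t] + _cross_pairs(rest)
--
-- def compute_gold_pairs(products):
--     """Gold pairs without a dict: scan distinct models in first-occurrence order and,
--     per model, collect its (index, shop) group by a direct filter, then cross it."""
--     models = [p.get("model", "") for p in products]
--     seen = []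
--     out = []
--     for m in models:
--         if m in seen:
--             continue
--         seen.append(m)
--         grp = [(i, p.get("shop")) for i, p in enumerate(products) if p.get("model", "") == m]
--         out += _cross_pairs(grp)
--     return set(out)
-- ===== Notes on version B (the rewrite author's own statement) =====
-- stated objective: alternative
-- what changed: B drops A's defaultdict/combinations machinery entirely: it scans the distinct models in first-occurrence order, collects each model's (index, shop) group by a direct filter over the enumerated products, and emits ordered pairs by a structural recursion on the group, so no dict, no combinations and no tuple(sorted) appear.
import Mathlib
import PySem

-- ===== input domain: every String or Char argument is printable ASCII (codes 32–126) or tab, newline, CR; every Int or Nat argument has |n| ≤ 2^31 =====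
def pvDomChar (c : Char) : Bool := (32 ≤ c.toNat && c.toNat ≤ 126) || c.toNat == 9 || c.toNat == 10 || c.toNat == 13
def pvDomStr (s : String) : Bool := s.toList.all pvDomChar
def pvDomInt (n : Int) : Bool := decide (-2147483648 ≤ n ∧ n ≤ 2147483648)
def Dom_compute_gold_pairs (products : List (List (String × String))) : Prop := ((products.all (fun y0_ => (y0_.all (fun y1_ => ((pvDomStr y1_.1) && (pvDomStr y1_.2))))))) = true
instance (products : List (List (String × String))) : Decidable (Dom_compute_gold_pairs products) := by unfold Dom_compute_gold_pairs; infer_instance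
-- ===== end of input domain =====

-- B drops A's defaultdict/combinations machinery: it scans the distinct models in
-- first-occurrence order, collects each model's (index, shop) group by a direct filter,
-- and crosses the group by structural recursion (objective: alternative).

-- ===== PORT A =====
-- tuple(sorted((i, j))) on two ints (exact)
def pvPairSorted (i j : Int) : Int × Int := if i ≤ j then (i, j) else (j, i)

-- itertools.combinations(l, 2) (exact for r = 2)
def pvComb2 {α : Type} : List α → List (α × α)
  | [] => []
  | x :: xs => xs.map (fun y => (x, y)) ++ pvComb2 xs

def compute_gold_pairs (products : List (List (String × String))) : List (Int × Int) :=
  let model_map : PySem.Dict String (List (Int × Option String)) :=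
    (PySem.List.enumerate products).foldl
      (fun d p => d.modify ((PySem.Dict.mk p.2).getD "model" "") []
        (fun l => l ++ [(p.1, (PySem.Dict.mk p.2).get? "shop")]))
      (PySem.Dict.mk [])
  model_map.values.foldl
    (fun gold items =>
      if 1 < items.length then
        (pvComb2 items).foldl
          (fun g pr => if pr.1.2 ≠ pr.2.2 then PySem.Set.add g (pvPairSorted pr.1.1 pr.2.1) else g)
          gold
      else gold)
    []

-- ===== PORT B =====
-- _cross_pairs: all (i, j) with i before j in grp and different shops, recursion on grp
def pvCrossPairs : List (Int × Option String) → List (Int × Int)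
  | [] => []
  | u :: rest => (rest.filter (fun v => decide (u.2 ≠ v.2))).map (fun v => (u.1, v.1)) ++ pvCrossPairs rest

def compute_gold_pairs_alt (products : List (List (String × String))) : List (Int × Int) :=
  let models : List String := products.map (fun p => (PySem.Dict.mk p).getD "model" "")
  let res : List String × List (Int × Int) :=
    models.foldl
      (fun acc m =>
        if acc.1.contains m then acc
        else (acc.1 ++ [m],
          acc.2 ++ pvCrossPairs
            (((PySem.List.enumerate products).filter
                (fun q => (PySem.Dict.mk q.2).getD "model" "" == m)).map
              (fun q => (q.1, (PySem.Dict.mk q.2).get? "shop")))))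
      ([], [])
  PySem.Set.ofList res.2

-- ===== PRECONDITION & SPEC =====
def Spec_compute_gold_pairs (products : List (List (String × String))) (out : List (Int × Int)) : Prop := out = compute_gold_pairs_alt products
instance (products : List (List (String × String))) (out : List (Int × Int)) : Decidable (Spec_compute_gold_pairs products out) := by unfold Spec_compute_gold_pairs; infer_instance

-- ===== CLAIM (what is proved, stated in full; the proofs are below) =====
def Claim_equal_compute_gold_pairs : Prop := ∀ (products : List (List (String × String))), Dom_compute_gold_pairs products → Spec_compute_gold_pairs products (compute_gold_pairs products)

-- ===== LEMMAS AND PROOFS =====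

-- proof-side abbreviations
def pvMkey (p : List (String × String)) : String := (PySem.Dict.mk p).getD "model" ""
def pvShop (p : List (String × String)) : Option String := (PySem.Dict.mk p).get? "shop"

def pvModelMap (products : List (List (String × String))) : PySem.Dict String (List (Int × Option String)) :=
  (PySem.List.enumerate products).foldl
    (fun d p => d.modify ((PySem.Dict.mk p.2).getD "model" "") []
      (fun l => l ++ [(p.1, (PySem.Dict.mk p.2).get? "shop")]))
    (PySem.Dict.mk [])

def pvItemsOf (products : List (List (String × String))) (m : String) : List (Int × Option String) :=
  ((PySem.List.enumerate products).filter (fun q => pvMkey q.2 == m)).map (fun q => (q.1, pvShop q.2))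

def pvLA (items : List (Int × Option String)) : List (Int × Int) :=
  ((pvComb2 items).filter (fun pr => decide (pr.1.2 ≠ pr.2.2))).map (fun pr => pvPairSorted pr.1.1 pr.2.1)

-- the newly seen keys, in order, of a scan that skips already-seen ones
def pvNewKeys (seen : List String) : List String → List String
  | [] => []
  | m :: ms => if seen.contains m then pvNewKeys seen ms else m :: pvNewKeys (seen ++ [m]) ms

-- generic loop-shape: a guarded add-loop is a Set.update of the filtered mapped list
theorem pv_foldl_if_add {α β : Type} [BEq β] (p : α → Prop) [DecidablePred p] (f : α → β)
    (l : List α) (s : PySem.Set β) :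
    l.foldl (fun g x => if p x then PySem.Set.add g (f x) else g) s
      = PySem.Set.update s ((l.filter (fun x => decide (p x))).map f) := by
  induction l generalizing s with
  | nil => simp [PySem.Set.update]
  | cons x xs ih =>
    by_cases hx : p x <;> simp [hx, ih, PySem.Set.update]

-- the model_map dictionary, characterized
theorem pv_modelMap_eq_L (products : List (List (String × String))) :
    pvModelMap products
      = ((PySem.List.enumerate products).map (fun p => (pvMkey p.2, ((p.1 : Int), pvShop p.2)))).foldl
          (fun d q => d.modify q.1 [] (fun l => l ++ [q.2])) (PySem.Dict.mk []) := by
  rw [List.foldl_map]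
  rfl

theorem pv_getD_modelMap (products : List (List (String × String))) (m : String) :
    (pvModelMap products).getD m [] = pvItemsOf products m := by
  rw [pv_modelMap_eq_L, PySem.Dict.getD_foldl_modify_append]
  simp [pvItemsOf, List.filter_map, Function.comp_def, PySem.Dict.getD, PySem.Dict.get?]

theorem pv_keys_modelMap (products : List (List (String × String))) :
    (pvModelMap products).keys
      = PySem.Set.ofList ((PySem.List.enumerate products).map (fun p => pvMkey p.2)) := by
  rw [pv_modelMap_eq_L]
  rw [PySem.Dict.keys_foldl_modify_key _ Prod.fst _ (fun _ q => fun l => l ++ [q.2])]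
  simp [List.map_map, Function.comp_def, PySem.Set.update_nil_left]

theorem pv_nodup_keys_modelMap (products : List (List (String × String))) :
    (pvModelMap products).keys.Nodup := by
  rw [pv_keys_modelMap]
  exact PySem.Set.nodup_ofList _

theorem pv_modelMap_values (products : List (List (String × String))) :
    (pvModelMap products).values
      = (PySem.Set.ofList ((PySem.List.enumerate products).map (fun p => pvMkey p.2))).map
          (pvItemsOf products) := by
  rw [PySem.Dict.values_eq_map_keys _ (pv_nodup_keys_modelMap products) [], pv_keys_modelMap]
  exact List.map_congr_left (fun m _ => pv_getD_modelMap products m)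

theorem pv_itemsOf_mono (products : List (List (String × String))) (m : String) :
    (pvItemsOf products m).Pairwise (fun a b => a.1 < b.1) := by
  unfold pvItemsOf
  exact ((PySem.List.pairwise_lt_enumerate products 0).filter _).map _ (fun _ _ hab => hab)

-- A's group step is a Set.update with pvLA
theorem pv_stepA {items : List (Int × Option String)} (gold : List (Int × Int)) :
    (if 1 < items.length then
        (pvComb2 items).foldl
          (fun g pr => if pr.1.2 ≠ pr.2.2 then PySem.Set.add g (pvPairSorted pr.1.1 pr.2.1) else g)
          gold
      else gold) = PySem.Set.update gold (pvLA items) := by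
  by_cases hlen : 1 < items.length
  · rw [if_pos hlen]
    exact pv_foldl_if_add
      (fun pr : (Int × Option String) × (Int × Option String) => pr.1.2 ≠ pr.2.2)
      (fun pr => pvPairSorted pr.1.1 pr.2.1) (pvComb2 items) gold
  · rw [if_neg hlen]
    have hla : pvLA items = [] := by
      cases items with
      | nil => rfl
      | cons x xs =>
        cases xs with
        | nil => rfl
        | cons y ys => exact absurd (by simp [List.length_cons]) hlen
    rw [hla]
    rfl

-- folding Set.update over a list of lists is one Set.update of the flattened stream
theorem pv_foldl_update {β : Type} [BEq β] (L : List (List β)) (s : PySem.Set β) :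
    L.foldl (fun g l => PySem.Set.update g l) s = PySem.Set.update s L.flatten := by
  induction L generalizing s with
  | nil => simp [PySem.Set.update]
  | cons l ls ih => simp [ih, PySem.Set.update_append]

-- so A is Set.ofList of the concatenated per-group pvLA streams
theorem pv_A_stream (products : List (List (String × String))) :
    compute_gold_pairs products
      = PySem.Set.ofList
          (((PySem.Set.ofList ((PySem.List.enumerate products).map (fun p => pvMkey p.2))).map
              (fun m => pvLA (pvItemsOf products m))).flatten) := by
  have hA : compute_gold_pairs products
      = (pvModelMap products).values.foldl
          (fun gold items =>
            if 1 < items.length then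
              (pvComb2 items).foldl
                (fun g pr => if pr.1.2 ≠ pr.2.2 then PySem.Set.add g (pvPairSorted pr.1.1 pr.2.1) else g)
                gold
            else gold) [] := rfl
  rw [hA, pv_modelMap_values]
  have hstep : ∀ (gold : List (Int × Int)) (items : List (Int × Option String)),
      (if 1 < items.length then
          (pvComb2 items).foldl
            (fun g pr => if pr.1.2 ≠ pr.2.2 then PySem.Set.add g (pvPairSorted pr.1.1 pr.2.1) else g)
            gold
        else gold) = PySem.Set.update gold (pvLA items) := fun gold items => pv_stepA gold
  calc ((PySem.Set.ofList ((PySem.List.enumerate products).map (fun p => pvMkey p.2))).map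
          (pvItemsOf products)).foldl
        (fun gold items =>
          if 1 < items.length then
            (pvComb2 items).foldl
              (fun g pr => if pr.1.2 ≠ pr.2.2 then PySem.Set.add g (pvPairSorted pr.1.1 pr.2.1) else g)
              gold
          else gold) []
      = ((PySem.Set.ofList ((PySem.List.enumerate products).map (fun p => pvMkey p.2))).map
          (pvItemsOf products)).foldl (fun gold items => PySem.Set.update gold (pvLA items)) [] := by
        exact PySem.List.foldl_congr_mem _ _ _ _ (fun gold items _ => hstep gold items)
    _ = ((PySem.Set.ofList ((PySem.List.enumerate products).map (fun p => pvMkey p.2))).map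
          (fun m => pvLA (pvItemsOf products m))).foldl (fun g l => PySem.Set.update g l) [] := by
        rw [List.foldl_map, List.foldl_map]
    _ = _ := by
        rw [pv_foldl_update]
        rfl

-- B side: pvCrossPairs equals pvLA on index-increasing groups
theorem pv_cross_eq_LA {items : List (Int × Option String)}
    (h : items.Pairwise (fun a b => a.1 < b.1)) :
    pvCrossPairs items = pvLA items := by
  induction items with
  | nil => rfl
  | cons u xs ih =>
    obtain ⟨hu, hxs⟩ := List.pairwise_cons.mp h
    have hrest := ih hxs
    simp only [pvCrossPairs, pvLA, pvComb2, List.filter_append, List.map_append]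
    rw [List.filter_map, List.map_map]
    refine congrArg₂ _ ?_ hrest
    refine List.map_congr_left (fun v hv => ?_)
    have hlt : u.1 < v.1 := hu v (List.mem_of_mem_filter hv)
    simp [pvPairSorted, le_of_lt hlt]

-- the seen/out accumulator loop of B, characterized
theorem pv_B_loop (products : List (List (String × String)))
    (ms : List String) (seen : List String) (out : List (Int × Int)) :
    (ms.foldl
      (fun acc m =>
        if acc.1.contains m then acc
        else (acc.1 ++ [m],
          acc.2 ++ pvCrossPairs
            (((PySem.List.enumerate products).filter
                (fun q => (PySem.Dict.mk q.2).getD "model" "" == m)).map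
              (fun q => (q.1, (PySem.Dict.mk q.2).get? "shop")))))
      (seen, out)).2
    = out ++ ((pvNewKeys seen ms).map (fun m => pvCrossPairs (pvItemsOf products m))).flatten := by
  induction ms generalizing seen out with
  | nil => simp [pvNewKeys]
  | cons m ms ih =>
    by_cases hm : seen.contains m
    · simp only [List.foldl_cons, pvNewKeys, hm, if_true]
      exact ih seen out
    · simp only [List.foldl_cons, pvNewKeys, hm, if_false, Bool.false_eq_true]
      rw [ih (seen ++ [m]) _]
      simp [pvItemsOf, pvMkey, pvShop]

-- pvNewKeys from an empty seen list is Python's set()-dedup (first occurrences)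
theorem pv_newKeys_update (ms seen : List String) :
    PySem.Set.update seen ms = seen ++ pvNewKeys seen ms := by
  induction ms generalizing seen with
  | nil => simp [pvNewKeys, PySem.Set.update]
  | cons m ms ih =>
    by_cases hm : m ∈ seen
    · have hc : seen.contains m = true := by simpa using hm
      rw [PySem.Set.update_cons, PySem.Set.add_of_mem hm]
      simp only [pvNewKeys, hc, if_true]
      exact ih seen
    · have hc : ¬ seen.contains m = true := by simpa using hm
      rw [PySem.Set.update_cons, PySem.Set.add_of_not_mem hm]
      simp only [pvNewKeys, hc]
      rw [ih (seen ++ [m])]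
      simp

theorem pv_newKeys_nil (ms : List String) :
    pvNewKeys [] ms = PySem.Set.ofList ms := by
  have := pv_newKeys_update ms []
  simpa [PySem.Set.update_nil_left] using this.symm

-- B is Set.ofList of the concatenated per-distinct-model pvCrossPairs streams
theorem pv_B_stream (products : List (List (String × String))) :
    compute_gold_pairs_alt products
      = PySem.Set.ofList
          (((PySem.Set.ofList ((PySem.List.enumerate products).map (fun p => pvMkey p.2))).map
              (fun m => pvCrossPairs (pvItemsOf products m))).flatten) := by
  have hmodels : products.map (fun p => (PySem.Dict.mk p).getD "model" "")
      = (PySem.List.enumerate products).map (fun p => pvMkey p.2) := by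
    rw [show (fun p : (Int × List (String × String)) => pvMkey p.2)
          = (fun p : List (String × String) => pvMkey p) ∘ Prod.snd from rfl]
    rw [← List.map_map, PySem.List.map_snd_enumerate]
    rfl
  show PySem.Set.ofList
      ((products.map (fun p => (PySem.Dict.mk p).getD "model" "")).foldl _ (([] : List String), ([] : List (Int × Int)))).2 = _
  rw [hmodels, pv_B_loop products _ [] [], pv_newKeys_nil]
  simp

theorem pv_main (products : List (List (String × String))) :
    compute_gold_pairs products = compute_gold_pairs_alt products := by
  rw [pv_A_stream, pv_B_stream]
  refine congrArg _ (congrArg _ (List.map_congr_left (fun m _ => ?_)))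
  exact (pv_cross_eq_LA (pv_itemsOf_mono products m)).symm

-- ===== VERDICT (by name: the statement is the Claim_ definition above) =====
theorem compute_gold_pairs_spec : Claim_equal_compute_gold_pairs := by
  intro products _
  unfold Spec_compute_gold_pairs
  exact pv_main products
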